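-- pv_equiv track=rewrite | github.com/limsu1015/codingtest | 백준/Gold/2447. 별 찍기 － 10/별 찍기 － 10.py | renderStars
-- ===== SOURCE A (Python) =====
-- def renderStars(n):
--   if n == 1:
--     return ['*']
--
--   Stars = renderStars(n//3)
--   list = []
--
--   for star in Stars:
--     list.append(star*3)
--   for star in Stars:
--     list.append(star+' '*(n//3)+star)
--   for star in Stars:
--     list.append(star*3)
--
--   return list
-- ===== SOURCE B (Python) =====
-- def renderStars(n):
--   # Bottom-up: record the n//3 spacing widths along the chain n -> n//3 -> ... -> 1,
--   # then grow the grid from ['*'] outward, innermost width last recorded = applied first.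
--   widths = []
--   m = n
--   while m != 1:
--     widths.append(m // 3)
--     m //= 3
--   grid = ['*']
--   for w in reversed(widths):
--     grid = ([row * 3 for row in grid]
--             + [row + ' ' * w + row for row in grid]
--             + [row * 3 for row in grid])
--   return grid
-- ===== Notes on version B (the rewrite author's own statement) =====
-- stated objective: alternative
-- what changed: replaces the top-down recursion by an iterative bottom-up construction: first compute the chain of n//3 spacing widths down to 1 with a loop, then grow the grid from ['*'] outward by folding over the recorded widths in reverse
import Mathlib
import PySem

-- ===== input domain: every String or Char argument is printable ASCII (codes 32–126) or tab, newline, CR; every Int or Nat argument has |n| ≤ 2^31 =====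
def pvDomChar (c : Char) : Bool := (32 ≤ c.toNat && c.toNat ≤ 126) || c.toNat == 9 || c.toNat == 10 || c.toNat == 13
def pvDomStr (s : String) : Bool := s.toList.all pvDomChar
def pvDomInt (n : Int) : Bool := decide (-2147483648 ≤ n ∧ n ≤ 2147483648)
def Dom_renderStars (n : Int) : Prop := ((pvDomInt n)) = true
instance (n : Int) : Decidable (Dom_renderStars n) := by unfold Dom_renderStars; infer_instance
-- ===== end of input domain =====

-- B replaces A's top-down recursion by an iterative bottom-up build (width chain + fold); same output on Pre_.


-- ===== PORT A =====
-- ' ' * w (Python string repetition; negative w gives the empty string, matched by Int.toNat)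
def pvSpaces (w : Int) : String := String.mk (List.replicate w.toNat ' ')

-- literal port of A's recursion; fuel bounds the recursion depth (Pre_ guarantees ≤ 21 < 64 levels)
def renderStarsFuel (fuel : Nat) (n : Int) : List String :=
  match fuel with
  | 0 => []
  | fuel + 1 =>
    if n = 1 then ["*"]
    else
      let stars := renderStarsFuel fuel (PySem.Int.floordiv n 3)
      let l1 := stars.map (fun star => star ++ star ++ star)
      let l2 := stars.map (fun star => star ++ pvSpaces (PySem.Int.floordiv n 3) ++ star)
      let l3 := stars.map (fun star => star ++ star ++ star)
      l1 ++ l2 ++ l3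

def renderStars (n : Int) : List String := renderStarsFuel 64 n

-- ===== PORT B =====
-- the while loop recording m//3 at each step until m reaches 1 (fuel as above)
def chainWidths (fuel : Nat) (m : Int) : List Int :=
  match fuel with
  | 0 => []
  | fuel + 1 =>
    if m = 1 then []
    else PySem.Int.floordiv m 3 :: chainWidths fuel (PySem.Int.floordiv m 3)

-- one grow step of B's loop body
def growGrid (grid : List String) (w : Int) : List String :=
  (grid.map fun row => row ++ row ++ row)
    ++ (grid.map fun row => row ++ pvSpaces w ++ row)
    ++ (grid.map fun row => row ++ row ++ row)

def renderStars_alt (n : Int) : List String :=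
  ((chainWidths 64 n).reverse).foldl growGrid ["*"]

-- ===== PRECONDITION & SPEC =====
-- Pre_ excludes exactly the inputs on which A raises RecursionError: the chain n -> n//3 -> ... reaches 1
-- iff 3^k ≤ n < 2*3^k for some k (k ≤ 20 suffices on Dom, |n| ≤ 2^31 < 3^21).
def Pre_renderStars (n : Int) : Prop := ∃ k : Nat, k < 21 ∧ 3 ^ k ≤ n ∧ n < 2 * 3 ^ k
instance (n : Int) : Decidable (Pre_renderStars n) := by unfold Pre_renderStars; infer_instance
def pvWitness_renderStars : Int := 27
def Spec_renderStars (n : Int) (out : List String) : Prop := out = renderStars_alt n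
instance (n : Int) (out : List String) : Decidable (Spec_renderStars n out) := by unfold Spec_renderStars; infer_instance

-- ===== CLAIM (what is proved, stated in full; the proofs are below) =====
def Claim_equal_renderStars : Prop := ∀ (n : Int), Dom_renderStars n → Pre_renderStars n → Spec_renderStars n (renderStars n)

-- ===== LEMMAS AND PROOFS =====

-- the floordiv step preserves the bracket one level down
theorem floordiv_bracket (k : Nat) (n : Int) (h1 : 3 ^ (k + 1) ≤ n) (h2 : n < 2 * 3 ^ (k + 1)) :
    3 ^ k ≤ PySem.Int.floordiv n 3 ∧ PySem.Int.floordiv n 3 < 2 * 3 ^ k := by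
  have hp : (0:Int) < 3 ^ k := by positivity
  rw [PySem.Int.floordiv_eq_ediv_of_pos (by omega)]
  have h3 : 3 ^ (k + 1) = 3 * 3 ^ k := by ring
  have hmod := Int.emod_nonneg n (by norm_num : (3:Int) ≠ 0)
  have hmod2 := Int.emod_lt_of_pos n (by norm_num : (0:Int) < 3)
  have hdm := Int.ediv_add_emod n 3
  omega

-- A's fuelled recursion equals the fold of the width chain
theorem key (k : Nat) : ∀ (n : Int) (f : Nat), k < f → 3 ^ k ≤ n → n < 2 * 3 ^ k →
    renderStarsFuel f n = (chainWidths f n).foldr (fun w g => growGrid g w) ["*"] := by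
  induction k with
  | zero =>
    intro n f hf h1 h2
    have hn : n = 1 := by simp at h1 h2; omega
    obtain ⟨f', rfl⟩ : ∃ f', f = f' + 1 := ⟨f - 1, by omega⟩
    simp [renderStarsFuel, chainWidths, hn]
  | succ k ih =>
    intro n f hf h1 h2
    have hp : (1:Int) ≤ 3 ^ (k + 1) := one_le_pow₀ (by norm_num)
    have hn : n ≠ 1 := by
      have : (3:Int) ≤ 3 ^ (k + 1) := by
        calc (3:Int) = 3 ^ 1 := by norm_num
        _ ≤ 3 ^ (k + 1) := by apply pow_le_pow_right₀ <;> omega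
      omega
    obtain ⟨hb1, hb2⟩ := floordiv_bracket k n h1 h2
    obtain ⟨f', rfl⟩ : ∃ f', f = f' + 1 := ⟨f - 1, by omega⟩
    have := ih (PySem.Int.floordiv n 3) f' (by omega) hb1 hb2
    simp only [renderStarsFuel, chainWidths, if_neg hn, List.foldr_cons, this]
    rfl

-- ===== VERDICT (by name: the statement is the Claim_ definition above) =====
theorem renderStars_spec : Claim_equal_renderStars := by
  intro n _ ⟨k, hk, h1, h2⟩
  unfold Spec_renderStars renderStars renderStars_alt
  rw [List.foldl_reverse]
  exact key k n 64 (by omega) h1 h2
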